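-- pv_equiv track=rewrite | github.com/Kuree/cgra_pnr | router.py | sort_netlist_id_for_io
-- ===== SOURCE A (Python) =====
-- def sort_netlist_id_for_io(netlist, reg_nets):
--     netlist_ids = list(netlist.keys())
--
--     def sort(net_id):
--         net = netlist[net_id]
--         if net_id in reg_nets:
--             return 1
--         for blk_id, _ in net:
--             if blk_id[0] == "i":
--                 return 0
--         return 2
--     netlist_ids.sort(key=lambda net_id: int(net_id[1:]))
--     # in-place sort
--     netlist_ids.sort(key=lambda net_id: sort(net_id))
--     return netlist_ids
-- ===== SOURCE B (Python) =====
-- def sort_netlist_id_for_io(netlist, reg_nets):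
--     def category(net_id):
--         if net_id in reg_nets:
--             return 1
--         for blk_id, _ in netlist[net_id]:
--             if blk_id[0] == "i":
--                 return 0
--         return 2
--
--     buckets = ([], [], [])
--     for net_id in sorted(netlist, key=lambda n: int(n[1:])):
--         buckets[category(net_id)].append(net_id)
--     return buckets[0] + buckets[1] + buckets[2]
-- ===== Notes on version B (the rewrite author's own statement) =====
-- stated objective: alternative
-- what changed: Replaces the second stable sort (by IO/reg category) with a single linear pass that partitions the numerically sorted ids into three category buckets and concatenates them.
import Mathlib
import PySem

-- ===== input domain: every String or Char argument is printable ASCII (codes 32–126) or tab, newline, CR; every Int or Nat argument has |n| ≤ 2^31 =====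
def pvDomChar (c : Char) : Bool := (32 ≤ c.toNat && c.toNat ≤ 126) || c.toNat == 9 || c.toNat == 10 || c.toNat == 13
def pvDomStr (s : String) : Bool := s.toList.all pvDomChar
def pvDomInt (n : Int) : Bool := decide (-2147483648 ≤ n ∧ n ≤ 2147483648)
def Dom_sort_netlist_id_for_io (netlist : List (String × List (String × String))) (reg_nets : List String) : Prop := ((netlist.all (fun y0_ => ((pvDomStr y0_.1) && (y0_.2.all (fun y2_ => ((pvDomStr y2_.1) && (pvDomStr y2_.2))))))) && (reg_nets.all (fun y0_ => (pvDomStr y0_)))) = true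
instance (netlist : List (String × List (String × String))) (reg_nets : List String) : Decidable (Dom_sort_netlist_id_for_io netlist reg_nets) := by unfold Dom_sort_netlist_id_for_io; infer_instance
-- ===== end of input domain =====

-- B replaces A's second stable sort (by IO/reg category) with one linear bucket-partition pass; equal return value on Pre_.

-- ===== PORT A =====
-- the 'for blk_id, _ in net: if blk_id[0] == "i": return 0 / return 2' loop of A's inner `sort` helper;
-- blk_id[0] raises IndexError on an empty blk_id — such inputs are outside Pre_ (here an empty id is scanned past)
def pvCatScanA : List (String × String) → Int
  | [] => 2
  | b :: rest => if b.1.toList.head? = some 'i' then 0 else pvCatScanA rest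

def sort_netlist_id_for_io (netlist : List (String × List (String × String))) (reg_nets : List String) : List String :=
  let d := PySem.Dict.ofList netlist
  let netlist_ids := d.keys
  -- A's inner `sort` key: netlist[net_id] is always present (keys come from the dict)
  let sortK : String → Int := fun net_id =>
    let net := (d.get? net_id).getD []
    if net_id ∈ reg_nets then 1 else pvCatScanA net
  -- int(net_id[1:]): raises ValueError when unparsable — outside Pre_ (getD 0 never read there)
  let ids1 := PySem.List.sorted netlist_ids (fun n => (PySem.Int.ofChars? (n.toList.drop 1)).getD 0) false
  PySem.List.sorted ids1 sortK false

-- ===== PORT B =====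
-- B's `category` helper: same reg-check-then-block-scan order as A (same raise caveats, outside Pre_)
def pvCatScanB : List (String × String) → Int
  | [] => 2
  | b :: rest => if b.1.toList.head? = some 'i' then 0 else pvCatScanB rest

def sort_netlist_id_for_io_alt (netlist : List (String × List (String × String))) (reg_nets : List String) : List String :=
  let d := PySem.Dict.ofList netlist
  let category : String → Int := fun net_id =>
    if net_id ∈ reg_nets then 1 else pvCatScanB ((d.get? net_id).getD [])
  let ordered := PySem.List.sorted d.keys (fun n => (PySem.Int.ofChars? (n.toList.drop 1)).getD 0) false
  let buckets := ordered.foldl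
    (fun (acc : List String × List String × List String) n =>
      let c := category n
      if c = 0 then (acc.1 ++ [n], acc.2.1, acc.2.2)
      else if c = 1 then (acc.1, acc.2.1 ++ [n], acc.2.2)
      else (acc.1, acc.2.1, acc.2.2 ++ [n]))
    ([], [], [])
  buckets.1 ++ buckets.2.1 ++ buckets.2.2

-- ===== PRECONDITION & SPEC =====
-- Pre_ excludes exactly the inputs where A raises: a net id whose tail is not a Python int literal
-- (ValueError in int(net_id[1:])), or a non-reg net with an empty block id before its first 'i'-block
-- (IndexError in blk_id[0]).
def Pre_sort_netlist_id_for_io (netlist : List (String × List (String × String))) (reg_nets : List String) : Prop :=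
  ∀ p ∈ (PySem.Dict.ofList netlist).items,
    (PySem.Int.ofChars? (p.1.toList.drop 1)).isSome = true ∧
    (p.1 ∈ reg_nets ∨ ∀ s ∈ (p.2.map Prod.fst).takeWhile (fun s => s.toList.head? != some 'i'), s ≠ "")
instance (netlist : List (String × List (String × String))) (reg_nets : List String) : Decidable (Pre_sort_netlist_id_for_io netlist reg_nets) := by unfold Pre_sort_netlist_id_for_io; infer_instance

def pvWitness_sort_netlist_id_for_io : (List (String × List (String × String))) × List String :=
  ([("e1", [("i0", "in")]), ("e2", []), ("e3", [("r4", "x")])], ["e2"])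

def Spec_sort_netlist_id_for_io (netlist : List (String × List (String × String))) (reg_nets : List String) (out : List String) : Prop := out = sort_netlist_id_for_io_alt netlist reg_nets
instance (netlist : List (String × List (String × String))) (reg_nets : List String) (out : List String) : Decidable (Spec_sort_netlist_id_for_io netlist reg_nets out) := by unfold Spec_sort_netlist_id_for_io; infer_instance

-- ===== CLAIM (what is proved, stated in full; the proofs are below) =====
def Claim_equal_sort_netlist_id_for_io : Prop := ∀ (netlist : List (String × List (String × String))) (reg_nets : List String), Dom_sort_netlist_id_for_io netlist reg_nets → Pre_sort_netlist_id_for_io netlist reg_nets → Spec_sort_netlist_id_for_io netlist reg_nets (sort_netlist_id_for_io netlist reg_nets)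

-- ===== LEMMAS AND PROOFS =====

theorem pvCatScanB_eq (l : List (String × String)) : pvCatScanB l = pvCatScanA l := by
  induction l with
  | nil => rfl
  | cons b rest ih => simp [pvCatScanA, pvCatScanB, ih]

theorem pvCatScanA_range (l : List (String × String)) : pvCatScanA l = 0 ∨ pvCatScanA l = 2 := by
  induction l with
  | nil => exact Or.inr rfl
  | cons b rest ih => by_cases h : b.1.toList.head? = some 'i' <;> simp [pvCatScanA, h, ih]

theorem insertBy_append {α : Type} (before : α → α → Bool) (x : α) (A B : List α)
    (hA : ∀ y ∈ A, before x y = false) :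
    PySem.List.insertBy before x (A ++ B) = A ++ PySem.List.insertBy before x B := by
  induction A with
  | nil => rfl
  | cons a rest ih =>
      have ha : before x a = false := hA a (by simp)
      simp [PySem.List.insertBy, ha]
      exact ih (fun y hy => hA y (by simp [hy]))

theorem insertBy_eq_cons {α : Type} (before : α → α → Bool) (x : α) (B : List α)
    (hB : ∀ y ∈ B, before x y = true) :
    PySem.List.insertBy before x B = x :: B := by
  cases B with
  | nil => rfl
  | cons b rest => simp [PySem.List.insertBy, hB b (by simp)]

theorem foldl_ins_tri (cat : String → Int) :
    ∀ (L a0 a1 a2 : List String),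
      (∀ x ∈ L, cat x = 0 ∨ cat x = 1 ∨ cat x = 2) →
      (∀ y ∈ a0, cat y = 0) → (∀ y ∈ a1, cat y = 1) → (∀ y ∈ a2, cat y = 2) →
      List.foldl (fun acc x => PySem.List.insertBy (fun a b => decide (cat a < cat b)) x acc)
          (a0 ++ a1 ++ a2) L
        = (a0 ++ L.filter (fun x => cat x == 0)) ++ (a1 ++ L.filter (fun x => cat x == 1))
            ++ (a2 ++ L.filter (fun x => cat x == 2)) := by
  intro L
  induction L with
  | nil => intro a0 a1 a2 _ _ _ _; simp
  | cons x L ih =>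
      intro a0 a1 a2 hL h0 h1 h2
      have hmem : ∀ y ∈ L, cat y = 0 ∨ cat y = 1 ∨ cat y = 2 := fun y hy => hL y (by simp [hy])
      rcases hL x (by simp) with hx | hx | hx
      · -- cat x = 0 : goes to the end of bucket 0
        have step : PySem.List.insertBy (fun a b => decide (cat a < cat b)) x (a0 ++ a1 ++ a2)
            = (a0 ++ [x]) ++ a1 ++ a2 := by
          rw [List.append_assoc,
            insertBy_append _ x a0 (a1 ++ a2) (fun y hy => by simp [h0 y hy, hx]),
            insertBy_eq_cons _ x (a1 ++ a2) (fun y hy => by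
              rcases List.mem_append.1 hy with h | h
              · simp [h1 y h, hx]
              · simp [h2 y h, hx])]
          simp
        simp only [List.foldl_cons, step]
        rw [ih (a0 ++ [x]) a1 a2 hmem
          (fun y hy => by rcases List.mem_append.1 hy with h | h
                          · exact h0 y h
                          · simp at h; simpa [h] using hx)
          h1 h2]
        simp [hx, List.append_assoc]
      · -- cat x = 1 : goes to the end of bucket 1
        have step : PySem.List.insertBy (fun a b => decide (cat a < cat b)) x (a0 ++ a1 ++ a2)
            = a0 ++ (a1 ++ [x]) ++ a2 := by
          rw [insertBy_append _ x (a0 ++ a1) a2 (fun y hy => by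
              rcases List.mem_append.1 hy with h | h
              · simp [h0 y h, hx]
              · simp [h1 y h, hx]),
            insertBy_eq_cons _ x a2 (fun y hy => by simp [h2 y hy, hx])]
          simp
        simp only [List.foldl_cons, step]
        rw [ih a0 (a1 ++ [x]) a2 hmem h0
          (fun y hy => by rcases List.mem_append.1 hy with h | h
                          · exact h1 y h
                          · simp at h; simpa [h] using hx)
          h2]
        simp [hx, List.append_assoc]
      · -- cat x = 2 : goes to the very end
        have step : PySem.List.insertBy (fun a b => decide (cat a < cat b)) x (a0 ++ a1 ++ a2)
            = a0 ++ a1 ++ (a2 ++ [x]) := by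
          rw [show a0 ++ a1 ++ a2 = (a0 ++ a1 ++ a2) ++ [] by simp,
            insertBy_append _ x (a0 ++ a1 ++ a2) [] (fun y hy => by
              rcases List.mem_append.1 hy with h | h
              · rcases List.mem_append.1 h with h' | h'
                · simp [h0 y h', hx]
                · simp [h1 y h', hx]
              · simp [h2 y h, hx])]
          simp [PySem.List.insertBy, List.append_assoc]
        simp only [List.foldl_cons, step]
        rw [ih a0 a1 (a2 ++ [x]) hmem h0 h1
          (fun y hy => by rcases List.mem_append.1 hy with h | h
                          · exact h2 y h
                          · simp at h; simpa [h] using hx)]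
        simp [hx, List.append_assoc]

theorem foldl_buckets (cat : String → Int) :
    ∀ (L : List String) (a0 a1 a2 : List String),
      (∀ x ∈ L, cat x = 0 ∨ cat x = 1 ∨ cat x = 2) →
      L.foldl (fun (acc : List String × List String × List String) n =>
          let c := cat n
          if c = 0 then (acc.1 ++ [n], acc.2.1, acc.2.2)
          else if c = 1 then (acc.1, acc.2.1 ++ [n], acc.2.2)
          else (acc.1, acc.2.1, acc.2.2 ++ [n])) (a0, a1, a2)
        = (a0 ++ L.filter (fun x => cat x == 0), a1 ++ L.filter (fun x => cat x == 1),
            a2 ++ L.filter (fun x => cat x == 2)) := by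
  intro L
  induction L with
  | nil => intro a0 a1 a2 _; simp
  | cons x L ih =>
      intro a0 a1 a2 hL
      have hmem : ∀ y ∈ L, cat y = 0 ∨ cat y = 1 ∨ cat y = 2 := fun y hy => hL y (by simp [hy])
      rcases hL x (by simp) with hx | hx | hx <;>
        simp only [List.foldl_cons, hx] <;>
        simp [ih _ _ _ hmem, hx, List.append_assoc]

-- ===== VERDICT (by name: the statement is the Claim_ definition above) =====
theorem sort_netlist_id_for_io_spec : Claim_equal_sort_netlist_id_for_io := by
  intro netlist reg_nets _dom _pre
  unfold Spec_sort_netlist_id_for_io sort_netlist_id_for_io sort_netlist_id_for_io_alt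
  simp only [pvCatScanB_eq]
  set d := PySem.Dict.ofList netlist with hd
  set cat : String → Int := fun net_id =>
    if net_id ∈ reg_nets then 1 else pvCatScanA ((d.get? net_id).getD []) with hcat
  set L := PySem.List.sorted d.keys (fun n => (PySem.Int.ofChars? (n.toList.drop 1)).getD 0) false
    with hL
  have hrange : ∀ x ∈ L, cat x = 0 ∨ cat x = 1 ∨ cat x = 2 := by
    intro x _
    by_cases h : x ∈ reg_nets
    · simp [hcat, h]
    · rcases pvCatScanA_range ((d.get? x).getD []) with h2 | h2 <;> simp [hcat, h, h2]
  rw [foldl_buckets cat L [] [] [] hrange]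
  have : PySem.List.sorted L cat false
      = List.foldl (fun acc x => PySem.List.insertBy (fun a b => decide (cat a < cat b)) x acc)
          ([] ++ [] ++ []) L := by
    simp [PySem.List.sorted]
  rw [this, foldl_ins_tri cat L [] [] [] hrange (by simp) (by simp) (by simp)]
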